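-- pv_equiv track=rewrite | github.com/Prathyarthi/Python_training | basketball.py | max_possible_score
-- ===== SOURCE A (Python) =====
-- def max_possible_score(N,K,A):
--     scores = [(i+1)*A[i] for i in range(N)]
--
--     current_sum = sum(scores[:K])
--
--     max_sum = current_sum
--
--     for i in range(K,N):
--         current_sum+=scores[i]
--         max_sum = max(max_sum,current_sum)
--
--     return max_sum
-- ===== SOURCE B (Python) =====
-- def max_possible_score(N, K, A):
--     scores = [(i + 1) * A[i] for i in range(N)]
--     best = 0
--     for s in reversed(scores[K:]):
--         best = max(0, s + best)
--     return sum(scores[:K]) + best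
-- ===== Notes on version B (the rewrite author's own statement) =====
-- stated objective: alternative
-- what changed: A accumulates prefix sums left-to-right while tracking a running max; B never forms any prefix sum past the seed: it scans scores[K:] right-to-left with the Kadane-style recurrence best = max(0, s + best) computing the best (possibly empty) prefix gain, and returns sum(scores[:K]) + best.
-- outside the precondition, e.g. on max_possible_score(4, 0, [1, 2, 3]): A raises IndexError, B raises IndexError; on max_possible_score(3, -1, [1, 2, 3]): A returns 28, B returns 14
import Mathlib
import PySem

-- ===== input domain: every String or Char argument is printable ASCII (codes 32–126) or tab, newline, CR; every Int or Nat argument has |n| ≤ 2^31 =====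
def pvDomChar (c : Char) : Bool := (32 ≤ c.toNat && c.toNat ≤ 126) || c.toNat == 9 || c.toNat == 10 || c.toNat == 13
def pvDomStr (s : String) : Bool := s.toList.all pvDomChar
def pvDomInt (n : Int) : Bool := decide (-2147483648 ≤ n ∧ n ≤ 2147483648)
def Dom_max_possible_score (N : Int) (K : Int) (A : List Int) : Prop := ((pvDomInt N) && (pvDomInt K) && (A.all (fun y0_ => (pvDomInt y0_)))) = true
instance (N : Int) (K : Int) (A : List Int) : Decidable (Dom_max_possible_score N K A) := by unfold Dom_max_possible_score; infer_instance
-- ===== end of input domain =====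

-- B replaces A's fused prefix-sum-and-running-max loop with a right-to-left Kadane-style scan of
-- scores[K:] (best = max(0, s + best), the best possibly-empty prefix gain) added to the seed
-- sum(scores[:K]); equal return values on Pre_.


-- ===== PORT A =====
def max_possible_score (N : Int) (K : Int) (A : List Int) : Int :=
  let scores := (PySem.List.pyRange 0 N 1).map (fun i => (i + 1) * PySem.List.pyGetD A i 0)
  let currentSum := (PySem.List.slice scores none (some K)).sum
  let maxSum := currentSum
  let r := (PySem.List.pyRange K N 1).foldl
    (fun (st : Int × Int) i =>
      let cur := st.1 + PySem.List.pyGetD scores i 0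
      (cur, max st.2 cur)) (currentSum, maxSum)
  r.2

-- ===== PORT B =====
def max_possible_score_alt (N : Int) (K : Int) (A : List Int) : Int :=
  let scores := (PySem.List.pyRange 0 N 1).map (fun i => (i + 1) * PySem.List.pyGetD A i 0)
  let best := (PySem.List.slice scores (some K) none).reverse.foldl
    (fun best s => max 0 (s + best)) 0
  (PySem.List.slice scores none (some K)).sum + best

-- ===== PRECONDITION & SPEC =====
-- Pre_ excludes N > len(A), on which A raises IndexError building `scores`, and negative K with
-- K < N — an unspecified corner where A either raises IndexError (when N ≤ 0 or K < -N) or returns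
-- an accidental value mixing Python's slice clamping with negative-index wraparound in its loop,
-- so neither program's value is the specified one there (negative K with N ≤ K stays inside: the
-- loop is empty and both return 0).
def Pre_max_possible_score (N : Int) (K : Int) (A : List Int) : Prop :=
  (0 ≤ K ∨ N ≤ K) ∧ N ≤ (A.length : Int)
instance (N : Int) (K : Int) (A : List Int) : Decidable (Pre_max_possible_score N K A) := by
  unfold Pre_max_possible_score; infer_instance

def pvWitness_max_possible_score : Int × Int × List Int := (3, 1, [2, -1, 4])

def Spec_max_possible_score (N : Int) (K : Int) (A : List Int) (out : Int) : Prop := out = max_possible_score_alt N K A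
instance (N : Int) (K : Int) (A : List Int) (out : Int) : Decidable (Spec_max_possible_score N K A out) := by unfold Spec_max_possible_score; infer_instance

-- ===== CLAIM (what is proved, stated in full; the proofs are below) =====
def Claim_equal_max_possible_score : Prop := ∀ (N : Int) (K : Int) (A : List Int), Dom_max_possible_score N K A → Pre_max_possible_score N K A → Spec_max_possible_score N K A (max_possible_score N K A)

-- ===== LEMMAS AND PROOFS =====

/-- Running prefix sums of `l` starting after accumulated value `c` (the values A's loop visits). -/
def pvCums (c : Int) : List Int → List Int
  | [] => []
  | s :: t => (c + s) :: pvCums (c + s) t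

/-- B's Kadane recurrence as a right fold: the best (possibly empty) prefix gain of `l`. -/
def pvBest (l : List Int) : Int := l.foldr (fun s b => max 0 (s + b)) 0

lemma pvBest_nonneg (l : List Int) : 0 ≤ pvBest l := by
  cases l with
  | nil => simp [pvBest]
  | cons s t => simp [pvBest]

/-- A's fused loop computes the max of the running prefix sums. -/
lemma pv_loop_eq (l : List Int) : ∀ (c m : Int),
    (l.foldl (fun (st : Int × Int) s => (st.1 + s, max st.2 (st.1 + s))) (c, m)).2
      = (pvCums c l).foldl max m := by
  induction l with
  | nil => intro c m; simp [pvCums]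
  | cons s t ih => intro c m; simpa [pvCums] using ih (c + s) (max m (c + s))

/-- The max of the running prefix sums equals the start value plus the best prefix gain. -/
lemma pv_max_cums (l : List Int) : ∀ (c m : Int), c ≤ m →
    (pvCums c l).foldl max m = max m (c + pvBest l) := by
  induction l with
  | nil => intro c m h; simp [pvCums, pvBest]; omega
  | cons s t ih =>
    intro c m h
    have hb := pvBest_nonneg t
    have := ih (c + s) (max m (c + s)) (le_max_right _ _)
    simp only [pvCums, List.foldl, this, pvBest, List.foldr] at *
    omega

lemma pv_core (l : List Int) (c : Int) :
    (l.foldl (fun (st : Int × Int) s => (st.1 + s, max st.2 (st.1 + s))) (c, c)).2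
      = c + l.reverse.foldl (fun best s => max 0 (s + best)) 0 := by
  rw [pv_loop_eq, pv_max_cums l c c le_rfl, List.foldl_reverse]
  have := pvBest_nonneg l
  simp only [pvBest] at *
  have hfr : l.foldr (fun s best => max 0 (s + best)) 0
      = l.foldr (fun s b => max 0 (s + b)) 0 := rfl
  omega

-- ===== VERDICT (by name: the statement is the Claim_ definition above) =====
theorem max_possible_score_spec : Claim_equal_max_possible_score := by
  intro N K A _ hpre
  obtain ⟨hKor, hNA⟩ := hpre
  unfold Spec_max_possible_score max_possible_score max_possible_score_alt
  set scores := (PySem.List.pyRange 0 N 1).map (fun i => (i + 1) * PySem.List.pyGetD A i 0) with hscdef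
  have hlen : scores.length = N.toNat := by
    simp [hscdef, PySem.List.length_pyRange_one]
  by_cases hN : 0 ≤ N
  · have hK : 0 ≤ K := by omega
    have hNlen : N = (scores.length : Int) := by
      rw [hlen]; omega
    have hfold := PySem.List.foldl_pyRange_pyGetD' scores 0
      (fun (st : Int × Int) s => (st.1 + s, max st.2 (st.1 + s)))
      (((PySem.List.slice scores none (some K)).sum), ((PySem.List.slice scores none (some K)).sum))
      hK
    rw [hNlen]
    simp only [hfold, PySem.List.slice_from, hK]
    exact pv_core (scores.drop K.toNat) _
  · -- N < 0: scores = [], both ranges/slices empty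
    have hsc : scores = [] := by
      have : N.toNat = 0 := by omega
      exact List.eq_nil_of_length_eq_zero (by omega)
    have hr : PySem.List.pyRange K N 1 = [] :=
      PySem.List.pyRange_one_eq_nil (by omega)
    simp [hsc, hr, PySem.List.slice]
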